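-- pv_equiv track=rewrite | github.com/Toyoda05/jrep202603 | src/full_text_scan.py | compute_cluster_distribution
-- ===== SOURCE A (Python) =====
-- def compute_cluster_distribution(labels, segs) -> dict:
--     """クラスタごとの章別出現頻度を集計する"""
--     distribution: dict = {}
--     for label, seg in zip(labels, segs):
--         ch_id = seg["scene_id"].split("_scene_")[0]
--         distribution.setdefault(int(label), {})
--         distribution[int(label)][ch_id] = (
--             distribution[int(label)].get(ch_id, 0) + 1
--         )
--     return distribution
-- ===== SOURCE B (Python) =====
-- def compute_cluster_distribution(labels, segs) -> dict:
--     """クラスタごとの章別出現頻度を集計する"""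
--     # Pass 1: flat counter keyed by (cluster, chapter).
--     counts = {}
--     for label, seg in zip(labels, segs):
--         key = (int(label), seg["scene_id"].split("_scene_")[0])
--         counts[key] = counts.get(key, 0) + 1
--     # Pass 2: assemble the nested dict from the flat counter.
--     distribution = {}
--     for (lab, ch), n in counts.items():
--         if lab in distribution:
--             distribution[lab][ch] = n
--         else:
--             distribution[lab] = {ch: n}
--     return distribution
-- ===== Notes on version B (the rewrite author's own statement) =====
-- stated objective: alternative
-- what changed: Replaces the incremental nested setdefault/get counting with two flat passes: first build a flat counter keyed by (cluster, chapter) pairs, then assemble the nested dict from the counter's items.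
import Mathlib
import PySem

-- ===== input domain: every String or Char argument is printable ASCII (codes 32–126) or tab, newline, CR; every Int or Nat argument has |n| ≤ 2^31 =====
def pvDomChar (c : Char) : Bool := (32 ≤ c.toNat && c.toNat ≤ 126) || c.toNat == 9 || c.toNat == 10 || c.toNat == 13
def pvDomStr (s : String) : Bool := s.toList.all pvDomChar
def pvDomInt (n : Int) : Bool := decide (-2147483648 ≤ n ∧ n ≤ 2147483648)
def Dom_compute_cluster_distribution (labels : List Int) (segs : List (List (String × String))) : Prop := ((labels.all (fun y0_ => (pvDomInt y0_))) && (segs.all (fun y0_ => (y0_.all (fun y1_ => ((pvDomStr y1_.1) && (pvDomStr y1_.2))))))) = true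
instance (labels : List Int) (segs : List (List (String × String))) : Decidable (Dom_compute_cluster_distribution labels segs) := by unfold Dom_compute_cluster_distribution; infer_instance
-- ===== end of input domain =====

-- B replaces the incremental nested setdefault/get counting with two flat passes (a flat
-- (cluster, chapter) counter, then assembly of the nested dict from its items); alternative, same cost.


-- ===== PORT A =====
-- seg["scene_id"].split("_scene_")[0]: the separator is nonempty so split? is `some`, and
-- Python's split always returns a nonempty list, so `[0]` is its head; the missing-key
-- case (Python KeyError) is excluded by Pre_ below, `getD` only names the present value there.
def pvChId (seg : List (String × String)) : String :=
  ((PySem.Str.split? ((PySem.Dict.mk seg).getD "scene_id" "") "_scene_").getD []).headD ""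

-- loop body of A: distribution.setdefault(int(label), {});
-- distribution[int(label)][ch_id] = distribution[int(label)].get(ch_id, 0) + 1
def pvStepA (dist : PySem.Dict Int (PySem.Dict String Int)) (label : Int) (ch : String) :
    PySem.Dict Int (PySem.Dict String Int) :=
  (dist.setdefault label PySem.Dict.empty).modify label PySem.Dict.empty
    (fun inner => inner.modify ch 0 (· + 1))

def compute_cluster_distribution (labels : List Int) (segs : List (List (String × String))) :
    List (Int × List (String × Int)) :=
  let dist : PySem.Dict Int (PySem.Dict String Int) :=
    (labels.zip segs).foldl (fun dist p => pvStepA dist p.1 (pvChId p.2)) PySem.Dict.empty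
  dist.items.map (fun q => (q.1, q.2.items))

-- ===== PORT B =====
-- loop body of B's second pass: if lab in distribution: distribution[lab][ch] = n
-- else: distribution[lab] = {ch: n}
def pvStepB (dist : PySem.Dict Int (PySem.Dict String Int)) (q : (Int × String) × Int) :
    PySem.Dict Int (PySem.Dict String Int) :=
  if dist.contains q.1.1 then
    dist.modify q.1.1 PySem.Dict.empty (fun inner => inner.insert q.1.2 q.2)
  else
    dist.insert q.1.1 (PySem.Dict.empty.insert q.1.2 q.2)

def compute_cluster_distribution_alt (labels : List Int) (segs : List (List (String × String))) :
    List (Int × List (String × Int)) :=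
  let counts : PySem.Dict (Int × String) Int :=
    (labels.zip segs).foldl
      (fun counts p =>
        let key := (p.1, pvChId p.2)
        counts.insert key (counts.getD key 0 + 1))
      PySem.Dict.empty
  let dist : PySem.Dict Int (PySem.Dict String Int) :=
    counts.items.foldl pvStepB PySem.Dict.empty
  dist.items.map (fun q => (q.1, q.2.items))

-- ===== PRECONDITION & SPEC =====
-- Pre_ excludes exactly the inputs where some seg zipped with a label lacks the key
-- "scene_id": there Python's seg["scene_id"] raises KeyError (in both A and B).
def Pre_compute_cluster_distribution (labels : List Int) (segs : List (List (String × String))) : Prop :=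
  ∀ p ∈ labels.zip segs, (PySem.Dict.mk p.2).contains "scene_id" = true
instance (labels : List Int) (segs : List (List (String × String))) : Decidable (Pre_compute_cluster_distribution labels segs) := by unfold Pre_compute_cluster_distribution; infer_instance

def pvWitness_compute_cluster_distribution : List Int × (List (List (String × String))) :=
  ([0, 1, 0],
   [[("scene_id", "ch1_scene_001")], [("scene_id", "ch1_scene_002")], [("scene_id", "ch2_scene_001")]])

def Spec_compute_cluster_distribution (labels : List Int) (segs : List (List (String × String))) (out : List (Int × List (String × Int))) : Prop := out = compute_cluster_distribution_alt labels segs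
instance (labels : List Int) (segs : List (List (String × String))) (out : List (Int × List (String × Int))) : Decidable (Spec_compute_cluster_distribution labels segs out) := by unfold Spec_compute_cluster_distribution; infer_instance

-- ===== CLAIM (what is proved, stated in full; the proofs are below) =====
def Claim_equal_compute_cluster_distribution : Prop := ∀ (labels : List Int) (segs : List (List (String × String))), Dom_compute_cluster_distribution labels segs → Pre_compute_cluster_distribution labels segs → Spec_compute_cluster_distribution labels segs (compute_cluster_distribution labels segs)

-- ===== LEMMAS AND PROOFS =====

-- the inner association list the nested dict holds for cluster l, read off the flat pair list
def pvInner (ps : List (Int × String)) (l : Int) : List (String × Int) :=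
  (PySem.Set.ofList ((ps.filter (fun k => k.1 == l)).map Prod.snd)).map
    (fun c => (c, (ps.count (l, c) : Int)))

-- the common normal form both folds reach, on the extracted (cluster, chapter) pairs
def pvNest (ps : List (Int × String)) : PySem.Dict Int (PySem.Dict String Int) :=
  PySem.Dict.mk ((PySem.Set.ofList (ps.map Prod.fst)).map
    (fun l => (l, PySem.Dict.mk (pvInner ps l))))

-- dedup commutes with map-then-dedup
theorem pvOfListMap {a b : Type} [BEq a] [LawfulBEq a] [BEq b] [LawfulBEq b]
    (f : a -> b) (xs : List a) :
    PySem.Set.ofList ((PySem.Set.ofList xs).map f) = PySem.Set.ofList (xs.map f) := by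
  induction xs using List.reverseRecOn with
  | nil => rfl
  | append_singleton xs x ih =>
    rw [PySem.Set.ofList_append_singleton, List.map_append, List.map_singleton,
      PySem.Set.ofList_append_singleton]
    by_cases hx : x ∈ PySem.Set.ofList xs
    · rw [PySem.Set.add_of_mem hx, ih]
      have hfx : f x ∈ PySem.Set.ofList (xs.map f) :=
        (PySem.Set.mem_ofList _ _).mpr (List.mem_map_of_mem ((PySem.Set.mem_ofList _ _).mp hx))
      rw [PySem.Set.add_of_mem hfx]
    · rw [PySem.Set.add_of_not_mem hx, List.map_append, List.map_singleton,
        PySem.Set.ofList_append_singleton, ih]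

-- taking the chapters of cluster l commutes with dedup of the pair list
theorem pvFilterSet (ps : List (Int × String)) (l : Int) :
    ((PySem.Set.ofList ps).filter (fun k => k.1 == l)).map Prod.snd
      = PySem.Set.ofList ((ps.filter (fun k => k.1 == l)).map Prod.snd) := by
  induction ps using List.reverseRecOn with
  | nil => rfl
  | append_singleton ps x ih =>
    rw [PySem.Set.ofList_append_singleton, List.filter_append, List.map_append]
    by_cases hxl : x.1 = l
    · have hfx : List.filter (fun k : Int × String => k.1 == l) [x] = [x] := by simp [hxl]
      rw [hfx, List.map_singleton, PySem.Set.ofList_append_singleton]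
      by_cases hx : x ∈ PySem.Set.ofList ps
      · rw [PySem.Set.add_of_mem hx, ih]
        have hx2 : x.2 ∈ PySem.Set.ofList ((ps.filter (fun k => k.1 == l)).map Prod.snd) := by
          rw [PySem.Set.mem_ofList]
          exact List.mem_map_of_mem (List.mem_filter.mpr
            ⟨(PySem.Set.mem_ofList _ _).mp hx, by simp [hxl]⟩)
        rw [PySem.Set.add_of_mem hx2]
      · rw [PySem.Set.add_of_not_mem hx, List.filter_append, hfx, List.map_append, ih]
        have hx2 : x.2 ∉ PySem.Set.ofList ((ps.filter (fun k => k.1 == l)).map Prod.snd) := by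
          rw [PySem.Set.mem_ofList]
          intro hmem
          rcases List.mem_map.mp hmem with ⟨r, hr, hr2⟩
          rcases List.mem_filter.mp hr with ⟨hrps, hrl⟩
          have : r = x := by
            have h1 : r.1 = l := by simpa using hrl
            exact Prod.ext_iff.mpr ⟨by rw [h1, hxl], hr2⟩
          exact hx ((PySem.Set.mem_ofList _ _).mpr (this ▸ hrps))
        rw [PySem.Set.add_of_not_mem hx2]
        simp
    · have hfx : List.filter (fun k : Int × String => k.1 == l) [x] = [] := by simp [hxl]
      rw [hfx, List.map_nil, List.append_nil]
      by_cases hx : x ∈ PySem.Set.ofList ps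
      · rw [PySem.Set.add_of_mem hx, ih]
      · rw [PySem.Set.add_of_not_mem hx, List.filter_append, hfx, List.append_nil, ih]

theorem pvFoldA_eq_nest (ps : List (Int × String)) :
    ps.foldl (fun d k => pvStepA d k.1 k.2) PySem.Dict.empty = pvNest ps := by
  induction ps using List.reverseRecOn with
  | nil => rfl
  | append_singleton ps k ih =>
    obtain ⟨k1, k2⟩ := k
    rw [List.foldl_append, List.foldl_cons, List.foldl_nil, ih]
    unfold pvNest
    have hT' : PySem.Set.ofList ((ps ++ [(k1, k2)]).map Prod.fst)
        = (PySem.Set.ofList (ps.map Prod.fst)).add k1 := by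
      rw [List.map_append, List.map_singleton, PySem.Set.ofList_append_singleton]
    have hfiltne : ∀ l : Int, k1 ≠ l →
        (ps ++ [(k1, k2)]).filter (fun r => r.1 == l) = ps.filter (fun r => r.1 == l) := by
      intro l hne
      rw [List.filter_append]
      simp [hne]
    have hfilteq : (ps ++ [(k1, k2)]).filter (fun r => r.1 == k1)
        = ps.filter (fun r => r.1 == k1) ++ [(k1, k2)] := by
      rw [List.filter_append]; simp
    have hcountne : ∀ x : Int × String, x ≠ (k1, k2) →
        (ps ++ [(k1, k2)]).count x = ps.count x := by
      intro x hx
      rw [List.count_append]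
      have h0 : List.count x [(k1, k2)] = 0 := List.count_eq_zero.mpr (by simp [hx])
      omega
    have hcountk : (ps ++ [(k1, k2)]).count (k1, k2) = ps.count (k1, k2) + 1 := by
      rw [List.count_append]
      simp
    have hinnerne : ∀ l : Int, k1 ≠ l → pvInner (ps ++ [(k1, k2)]) l = pvInner ps l := by
      intro l hne
      unfold pvInner
      rw [hfiltne l hne]
      apply List.map_congr_left
      intro c _
      have hx : ((l, c) : Int × String) ≠ (k1, k2) := by
        intro h
        exact hne (congrArg Prod.fst h).symm
      rw [hcountne _ hx]
    have hkeysnd : (PySem.Dict.mk ((PySem.Set.ofList (ps.map Prod.fst)).map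
        (fun l => (l, PySem.Dict.mk (pvInner ps l))))).keys.Nodup := by
      rw [PySem.Dict.keys_mk]
      simp only [List.map_map, Function.comp_def, List.map_id']
      exact PySem.Set.nodup_ofList (ps.map Prod.fst)
    rw [hT']
    by_cases hT : k1 ∈ PySem.Set.ofList (ps.map Prod.fst)
    · -- this cluster label was seen before
      have hcont : (PySem.Dict.mk ((PySem.Set.ofList (ps.map Prod.fst)).map
          (fun l => (l, PySem.Dict.mk (pvInner ps l))))).contains k1 = true := by
        rw [PySem.Dict.contains_mk, List.any_eq_true]
        exact ⟨_, List.mem_map_of_mem hT, by simp⟩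
      have hget : (PySem.Dict.mk ((PySem.Set.ofList (ps.map Prod.fst)).map
          (fun l => (l, PySem.Dict.mk (pvInner ps l))))).getD k1 PySem.Dict.empty
          = PySem.Dict.mk (pvInner ps k1) :=
        PySem.Dict.getD_of_mem_items _ (List.mem_map_of_mem
          (f := fun l => (l, PySem.Dict.mk (pvInner ps l))) hT) hkeysnd _
      unfold pvStepA
      rw [PySem.Dict.setdefault_of_contains _ _ hcont, PySem.Set.add_of_mem hT]
      simp only [PySem.Dict.modify]
      rw [hget]
      apply PySem.Dict.ext
      rw [PySem.Dict.items_insert_of_contains _ _ hcont]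
      rw [List.map_map]
      apply List.map_congr_left
      intro l' hl'
      by_cases heq : l' = k1
      · subst heq
        simp only [Function.comp_apply, beq_self_eq_true, if_pos]
        refine congrArg _ ?_
        -- inner dict update at chapter k2
        unfold pvInner
        rw [hfilteq, List.map_append, List.map_singleton, PySem.Set.ofList_append_singleton]
        have hinnd : (PySem.Dict.mk (pvInner ps l')).keys.Nodup := by
          rw [PySem.Dict.keys_mk]
          unfold pvInner
          simp only [List.map_map, Function.comp_def, List.map_id']
          exact PySem.Set.nodup_ofList ((ps.filter (fun r => r.1 == l')).map Prod.snd)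
        by_cases hC : k2 ∈ PySem.Set.ofList ((ps.filter (fun r => r.1 == l')).map Prod.snd)
        · -- chapter already counted: bump its count in place
          rw [PySem.Set.add_of_mem hC]
          have hmemi : (k2, ((ps.count ((l', k2) : Int × String)) : Int)) ∈ pvInner ps l' := by
            unfold pvInner
            exact List.mem_map_of_mem
              (f := fun c => (c, ((ps.count ((l', c) : Int × String)) : Int))) hC
          have hcontc : (PySem.Dict.mk (pvInner ps l')).contains k2 = true := by
            rw [PySem.Dict.contains_mk, List.any_eq_true]
            exact ⟨_, hmemi, by simp⟩
          have hgetc : (PySem.Dict.mk (pvInner ps l')).getD k2 0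
              = ((ps.count ((l', k2) : Int × String)) : Int) :=
            PySem.Dict.getD_of_mem_items _ hmemi hinnd 0
          unfold pvInner at hcontc hgetc
          rw [hgetc]
          apply PySem.Dict.ext
          rw [PySem.Dict.items_insert_of_contains _ _ hcontc]
          show List.map _ ((PySem.Set.ofList ((ps.filter (fun k => k.1 == l')).map Prod.snd)).map
            (fun c => (c, ((ps.count ((l', c) : Int × String)) : Int)))) = _
          rw [List.map_map]
          apply List.map_congr_left
          intro c hc
          by_cases hceq : c = k2
          · subst hceq
            simp only [Function.comp_apply, beq_self_eq_true, if_pos]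
            rw [hcountk]
            simp
          · simp only [Function.comp_apply]
            rw [if_neg (by simp [hceq])]
            have hx : ((l', c) : Int × String) ≠ (l', k2) := by
              intro h
              exact hceq (congrArg Prod.snd h)
            rw [hcountne _ hx]
        · -- first scene of this chapter in this cluster
          rw [PySem.Set.add_of_not_mem hC]
          have hcontc : (PySem.Dict.mk (pvInner ps l')).contains k2 = false := by
            rw [PySem.Dict.contains_mk, List.any_eq_false]
            intro p hp
            unfold pvInner at hp
            rcases List.mem_map.mp hp with ⟨c, hc, rfl⟩
            simp only [beq_iff_eq]
            intro h2
            exact hC (h2 ▸ hc)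
          unfold pvInner at hcontc
          rw [PySem.Dict.getD_of_not_contains _ _ hcontc]
          apply PySem.Dict.ext
          rw [PySem.Dict.items_insert_of_not_contains _ _ hcontc]
          rw [List.map_append, List.map_singleton]
          congr 1
          · show (PySem.Set.ofList ((ps.filter (fun k => k.1 == l')).map Prod.snd)).map
                (fun c => (c, ((ps.count ((l', c) : Int × String)) : Int))) = _
            apply List.map_congr_left
            intro c hc
            have hx : ((l', c) : Int × String) ≠ (l', k2) := by
              intro h
              have hc2 : c = k2 := congrArg Prod.snd h
              exact hC (hc2 ▸ hc)
            rw [hcountne _ hx]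
          · have hzero : ps.count ((l', k2) : Int × String) = 0 := by
              rw [List.count_eq_zero]
              intro hmem
              apply hC
              rw [PySem.Set.mem_ofList]
              exact List.mem_map_of_mem (List.mem_filter.mpr ⟨hmem, by simp⟩)
            rw [hcountk, hzero]
            rfl
      · simp only [Function.comp_apply]
        rw [if_neg (by simp [heq])]
        have hne : k1 ≠ l' := fun h => heq h.symm
        rw [hinnerne l' hne]
    · -- a new cluster label
      have hcont : (PySem.Dict.mk ((PySem.Set.ofList (ps.map Prod.fst)).map
          (fun l => (l, PySem.Dict.mk (pvInner ps l))))).contains k1 = false := by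
        rw [PySem.Dict.contains_mk, List.any_eq_false]
        intro p hp
        rcases List.mem_map.mp hp with ⟨l', hl', rfl⟩
        simp only [beq_iff_eq]
        intro h2
        exact hT (h2 ▸ hl')
      have hfilnil : ps.filter (fun r => r.1 == k1) = [] := by
        rw [List.filter_eq_nil_iff]
        intro r hr
        simp only [beq_iff_eq]
        intro h2
        exact hT ((PySem.Set.mem_ofList _ _).mpr (h2 ▸ List.mem_map_of_mem (f := Prod.fst) hr))
      have hzero : ps.count ((k1, k2) : Int × String) = 0 := by
        rw [List.count_eq_zero]
        intro hmem
        exact hT ((PySem.Set.mem_ofList _ _).mpr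
          (by simpa using List.mem_map_of_mem (f := Prod.fst) hmem))
      unfold pvStepA
      rw [PySem.Dict.setdefault_of_not_contains _ _ hcont, PySem.Set.add_of_not_mem hT]
      have hcont1 : ((PySem.Dict.mk ((PySem.Set.ofList (ps.map Prod.fst)).map
          (fun l => (l, PySem.Dict.mk (pvInner ps l))))).insert k1 PySem.Dict.empty).contains k1
          = true := PySem.Dict.contains_insert_self _ _ _
      simp only [PySem.Dict.modify]
      rw [PySem.Dict.getD_insert_self]
      apply PySem.Dict.ext
      rw [PySem.Dict.items_insert_of_contains _ _ hcont1,
        PySem.Dict.items_insert_of_not_contains _ _ hcont,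
        List.map_append, List.map_singleton, List.map_append, List.map_singleton]
      congr 1
      · rw [List.map_map]
        apply List.map_congr_left
        intro l' hl'
        have hne : k1 ≠ l' := fun h => hT (h ▸ hl')
        simp only [Function.comp_apply]
        rw [if_neg (by simp [Ne.symm hne])]
        rw [hinnerne l' hne]
      · simp only [beq_self_eq_true, if_true]
        refine congrArg (fun d => [((k1 : Int), d)]) ?_
        apply PySem.Dict.ext
        rw [PySem.Dict.items_insert_of_not_contains _ _ (PySem.Dict.contains_empty _)]
        unfold pvInner
        rw [hfilteq, hfilnil, PySem.Dict.getD_empty]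
        simp [PySem.Set.ofList, PySem.Set.add, PySem.Dict.empty, hzero]

theorem pvGather (E : List ((Int × String) × Int)) (h : (E.map Prod.fst).Nodup) :
    E.foldl pvStepB PySem.Dict.empty =
      PySem.Dict.mk ((PySem.Set.ofList (E.map (fun q => q.1.1))).map (fun l =>
        (l, PySem.Dict.mk ((E.filter (fun q => q.1.1 == l)).map (fun q => (q.1.2, q.2)))))) := by
  induction E using List.reverseRecOn with
  | nil => rfl
  | append_singleton E q ih =>
    have hmap : (E.map Prod.fst ++ [q.1]).Nodup := by simpa using h
    have hndE : (E.map Prod.fst).Nodup := (List.nodup_append.mp hmap).1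
    have hq1 : q.1 ∉ E.map Prod.fst := by
      intro hm
      exact (List.nodup_append.mp hmap).2.2 q.1 hm q.1 (by simp) rfl
    rw [List.foldl_append, List.foldl_cons, List.foldl_nil, ih hndE]
    have hS' : PySem.Set.ofList ((E ++ [q]).map (fun r => r.1.1))
        = (PySem.Set.ofList (E.map (fun r => r.1.1))).add q.1.1 := by
      rw [List.map_append, List.map_singleton, PySem.Set.ofList_append_singleton]
    have hfilt : ∀ l : Int, q.1.1 ≠ l →
        (E ++ [q]).filter (fun r => r.1.1 == l) = E.filter (fun r => r.1.1 == l) := by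
      intro l hne
      rw [List.filter_append]
      simp [hne]
    have hfilteq : (E ++ [q]).filter (fun r => r.1.1 == q.1.1)
        = E.filter (fun r => r.1.1 == q.1.1) ++ [q] := by
      rw [List.filter_append]; simp
    have hkeysnd :
        (PySem.Dict.mk ((PySem.Set.ofList (E.map (fun r => r.1.1))).map
          (fun l => (l, PySem.Dict.mk ((E.filter (fun r => r.1.1 == l)).map (fun r => (r.1.2, r.2))))))).keys.Nodup := by
      rw [PySem.Dict.keys_mk]
      simp only [List.map_map, Function.comp_def, List.map_id']
      exact PySem.Set.nodup_ofList (E.map (fun r => r.1.1))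
    rw [hS']
    by_cases hl : q.1.1 ∈ PySem.Set.ofList (E.map (fun r => r.1.1))
    · -- this cluster label was seen before
      have hcont : (PySem.Dict.mk ((PySem.Set.ofList (E.map (fun r => r.1.1))).map
          (fun l => (l, PySem.Dict.mk ((E.filter (fun r => r.1.1 == l)).map (fun r => (r.1.2, r.2))))))).contains q.1.1 = true := by
        rw [PySem.Dict.contains_mk, List.any_eq_true]
        exact ⟨_, List.mem_map_of_mem hl, by simp⟩
      have hget : (PySem.Dict.mk ((PySem.Set.ofList (E.map (fun r => r.1.1))).map
          (fun l => (l, PySem.Dict.mk ((E.filter (fun r => r.1.1 == l)).map (fun r => (r.1.2, r.2))))))).getD q.1.1 PySem.Dict.empty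
          = PySem.Dict.mk ((E.filter (fun r => r.1.1 == q.1.1)).map (fun r => (r.1.2, r.2))) :=
        PySem.Dict.getD_of_mem_items _ (List.mem_map_of_mem
          (f := fun l => (l, PySem.Dict.mk ((E.filter (fun r => r.1.1 == l)).map
            (fun r => (r.1.2, r.2))))) hl) hkeysnd _
      have hfresh : (PySem.Dict.mk ((E.filter (fun r => r.1.1 == q.1.1)).map
          (fun r => (r.1.2, r.2)))).contains q.1.2 = false := by
        rw [PySem.Dict.contains_mk, List.any_eq_false]
        intro p hp
        rcases List.mem_map.mp hp with ⟨r, hr, rfl⟩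
        rcases List.mem_filter.mp hr with ⟨hrE, hrl⟩
        simp only [beq_iff_eq]
        intro h2
        apply hq1
        have hr1 : r.1 = q.1 := Prod.ext_iff.mpr ⟨by simpa using hrl, h2⟩
        exact hr1 ▸ List.mem_map_of_mem hrE
      unfold pvStepB
      rw [hcont, if_pos rfl, PySem.Set.add_of_mem hl]
      simp only [PySem.Dict.modify]
      rw [hget]
      apply PySem.Dict.ext
      rw [PySem.Dict.items_insert_of_contains _ _ hcont]
      rw [List.map_map]
      apply List.map_congr_left
      intro l' hl'
      by_cases heq : l' = q.1.1
      · subst heq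
        simp only [Function.comp_apply, beq_self_eq_true, if_pos]
        refine congrArg _ ?_
        apply PySem.Dict.ext
        rw [PySem.Dict.items_insert_of_not_contains _ _ hfresh, hfilteq, List.map_append]
        rfl
      · have hne : q.1.1 ≠ l' := fun h => heq h.symm
        simp only [Function.comp_apply]
        rw [if_neg (by simp [heq])]
        rw [hfilt l' hne]
    · -- a new cluster label
      have hcont : (PySem.Dict.mk ((PySem.Set.ofList (E.map (fun r => r.1.1))).map
          (fun l => (l, PySem.Dict.mk ((E.filter (fun r => r.1.1 == l)).map (fun r => (r.1.2, r.2))))))).contains q.1.1 = false := by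
        rw [PySem.Dict.contains_mk, List.any_eq_false]
        intro p hp
        rcases List.mem_map.mp hp with ⟨l', hl', rfl⟩
        simp only [beq_iff_eq]
        intro h2
        exact hl (h2 ▸ hl')
      unfold pvStepB
      rw [hcont, if_neg (by simp), PySem.Set.add_of_not_mem hl]
      apply PySem.Dict.ext
      rw [PySem.Dict.items_insert_of_not_contains _ _ hcont]
      rw [List.map_append, List.map_singleton]
      congr 1
      · apply List.map_congr_left
        intro l' hl'
        have hne : q.1.1 ≠ l' := fun h => hl (h ▸ hl')
        rw [hfilt l' hne]
      · have hnil : E.filter (fun r => r.1.1 == q.1.1) = [] := by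
          rw [List.filter_eq_nil_iff]
          intro r hr
          simp only [beq_iff_eq]
          intro h2
          exact hl ((PySem.Set.mem_ofList _ _).mpr (h2 ▸ List.mem_map_of_mem hr))
        rw [hfilteq, hnil]
        rfl

theorem pvFoldB_eq_nest (ps : List (Int × String)) :
    (PySem.Dict.counter ps).items.foldl pvStepB PySem.Dict.empty = pvNest ps := by
  rw [PySem.Dict.items_counter]
  have hnd : (((PySem.Set.ofList ps).map (fun k => (k, (ps.count k : Int)))).map Prod.fst).Nodup := by
    rw [List.map_map]
    simp only [Function.comp_def, List.map_id']
    exact PySem.Set.nodup_ofList ps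
  rw [pvGather _ hnd]
  unfold pvNest
  have houter : PySem.Set.ofList (((PySem.Set.ofList ps).map
        (fun k => (k, (ps.count k : Int)))).map (fun q => q.1.1))
      = PySem.Set.ofList (ps.map Prod.fst) := by
    rw [List.map_map]
    have hcomp : ((fun q : (Int × String) × Int => q.1.1) ∘
        (fun k : Int × String => (k, (ps.count k : Int)))) = Prod.fst := rfl
    rw [hcomp, pvOfListMap]
  rw [houter]
  apply PySem.Dict.ext
  apply List.map_congr_left
  intro l hlmem
  refine congrArg _ ?_
  apply PySem.Dict.ext
  show (((PySem.Set.ofList ps).map (fun k => (k, (ps.count k : Int)))).filter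
      (fun q => q.1.1 == l)).map (fun q => (q.1.2, q.2)) = pvInner ps l
  rw [List.filter_map, List.map_map]
  have hpt : ∀ x ∈ (PySem.Set.ofList ps).filter
      ((fun q : (Int × String) × Int => q.1.1 == l) ∘ (fun k => (k, (ps.count k : Int)))),
      ((fun q : (Int × String) × Int => (q.1.2, q.2)) ∘ (fun k => (k, (ps.count k : Int)))) x
        = ((fun c => (c, (ps.count (l, c) : Int))) ∘ Prod.snd) x := by
    intro x hx
    have h1 : x.1 = l := by simpa using (List.mem_filter.mp hx).2
    simp only [Function.comp_apply]
    rw [show ((l, x.2) : Int × String) = x by rw [← h1]]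
  rw [List.map_congr_left hpt, ← List.map_map]
  have hfilt : (PySem.Set.ofList ps).filter
      ((fun q : (Int × String) × Int => q.1.1 == l) ∘ (fun k => (k, (ps.count k : Int))))
      = (PySem.Set.ofList ps).filter (fun k => k.1 == l) := rfl
  rw [hfilt, pvFilterSet ps l]
  rfl

-- ===== VERDICT (by name: the statement is the Claim_ definition above) =====
theorem compute_cluster_distribution_spec : Claim_equal_compute_cluster_distribution := by
  intro labels segs _ _
  unfold Spec_compute_cluster_distribution
  unfold compute_cluster_distribution compute_cluster_distribution_alt
  have hA : (labels.zip segs).foldl (fun dist p => pvStepA dist p.1 (pvChId p.2)) PySem.Dict.empty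
      = ((labels.zip segs).map (fun p => (p.1, pvChId p.2))).foldl
          (fun d k => pvStepA d k.1 k.2) PySem.Dict.empty := by
    rw [List.foldl_map]
  have hB : (labels.zip segs).foldl
        (fun counts p =>
          let key := (p.1, pvChId p.2)
          counts.insert key (counts.getD key 0 + 1)) PySem.Dict.empty
      = PySem.Dict.counter ((labels.zip segs).map (fun p => (p.1, pvChId p.2))) := by
    rw [← PySem.Dict.foldl_insert_getD_add_one_eq_counter, List.foldl_map]
  simp only [hA, hB, pvFoldA_eq_nest, pvFoldB_eq_nest]
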